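-- pv_equiv track=rewrite | github.com/pushpahiremath77/Python_Programs | Practice_Problem/pluralize.py | pluralize_words
-- ===== SOURCE A (Python) =====
-- def pluralize_words(list1):
--     result = set()
--     new_dict = {}
--     for item in list1:
--         if item not in new_dict:
--             new_dict[item]=1
--         else:
--             new_dict[item]+=1
--
--     for key,value in new_dict.items():
--         if value>1:
--             result.add(key+"s")
--     return result
-- ===== SOURCE B (Python) =====
-- def pluralize_words(list1):
--     result = set()
--     rest = list(list1)
--     while rest:
--         w = rest.pop(0)
--         if w in rest:
--             result.add(w + "s")
--         rest = [x for x in rest if x != w]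
--     return result
-- ===== Notes on version B (the rewrite author's own statement) =====
-- stated objective: alternative
-- what changed: Replaces A's count-dictionary build plus a second pass over its items with a destructive head-peeling loop: take the first remaining word, pluralize it if it still occurs in the remainder (lookahead), and delete all its later copies, so no counts or auxiliary map exist at all.
import Mathlib
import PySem

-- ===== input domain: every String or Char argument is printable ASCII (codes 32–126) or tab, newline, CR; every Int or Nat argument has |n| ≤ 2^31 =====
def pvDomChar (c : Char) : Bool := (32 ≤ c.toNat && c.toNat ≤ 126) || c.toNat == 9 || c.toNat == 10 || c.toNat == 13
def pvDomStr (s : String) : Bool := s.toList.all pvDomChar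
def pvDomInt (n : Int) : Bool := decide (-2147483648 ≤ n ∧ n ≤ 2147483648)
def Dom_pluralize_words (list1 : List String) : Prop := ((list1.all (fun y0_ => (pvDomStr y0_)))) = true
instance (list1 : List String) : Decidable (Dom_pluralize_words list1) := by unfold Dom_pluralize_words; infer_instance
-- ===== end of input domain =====

-- B replaces A's count-dictionary + second items pass with a destructive head-peeling loop
-- (pluralize the head if it reoccurs in the remainder, then drop its later copies); alternative, no counts kept.


-- ===== PORT A =====
-- count dict built in one loop, then a second pass over its items collecting key+"s" for counts > 1
def pluralize_words (list1 : List String) : List String :=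
  let new_dict : PySem.Dict String Int :=
    list1.foldl (fun d item =>
      if d.contains item = false then d.insert item 1
      else d.insert item (d.getD item 0 + 1)   -- new_dict[item] += 1 (key present in this branch)
    ) PySem.Dict.empty
  new_dict.items.foldl (fun result kv =>
    if kv.2 > 1 then PySem.Set.add result (kv.1 ++ "s") else result) PySem.Set.empty

-- ===== PORT B =====
-- while rest: w = rest.pop(0); if w in rest: result.add(w+"s"); rest = [x for x in rest if x != w]
def pluralize_words_go (rest : List String) (result : PySem.Set String) : PySem.Set String :=
  match rest with
  | [] => result
  | w :: rs =>
      pluralize_words_go (rs.filter (fun x => x != w))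
        (if rs.contains w then PySem.Set.add result (w ++ "s") else result)
termination_by rest.length
decreasing_by simpa using Nat.lt_succ_of_le (List.length_filter_le _ rs)

def pluralize_words_alt (list1 : List String) : List String :=
  pluralize_words_go list1 PySem.Set.empty

-- ===== PRECONDITION & SPEC =====
def Spec_pluralize_words (list1 : List String) (out : List String) : Prop := out = pluralize_words_alt list1
instance (list1 : List String) (out : List String) : Decidable (Spec_pluralize_words list1 out) := by unfold Spec_pluralize_words; infer_instance

-- ===== CLAIM (what is proved, stated in full; the proofs are below) =====
def Claim_equal_pluralize_words : Prop := ∀ (list1 : List String), Dom_pluralize_words list1 → Spec_pluralize_words list1 (pluralize_words list1)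

-- ===== LEMMAS AND PROOFS =====

-- A's dict-building step is exactly the counter step
lemma dictA_eq_counter (list1 : List String) :
    list1.foldl (fun (d : PySem.Dict String Int) item =>
      if d.contains item = false then d.insert item 1
      else d.insert item (d.getD item 0 + 1)) PySem.Dict.empty = PySem.Dict.counter list1 := by
  rw [← PySem.Dict.foldl_insert_getD_add_one_eq_counter]
  apply PySem.List.foldl_congr_mem
  intro d x _
  by_cases h : d.contains x = true
  · simp [h]
  · have h0 : d.getD x 0 = 0 :=
      PySem.Dict.getD_of_not_contains d 0 (by simpa using h)
    simp [h, h0]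

-- dedup (first occurrences) commutes with filtering
lemma ofList_filter (p : String → Bool) (xs : List String) :
    (PySem.Set.ofList xs).filter p = PySem.Set.ofList (xs.filter p) := by
  induction xs with
  | nil => rfl
  | cons x rest ih =>
    rw [PySem.Set.ofList_cons]
    by_cases hp : p x = true
    · rw [List.filter_cons_of_pos hp, List.filter_cons_of_pos hp, PySem.Set.ofList_cons, ← ih]
      simp only [PySem.Set.discard, List.filter_filter]
      exact congrArg _ (List.filter_congr (fun y _ => by rw [Bool.and_comm]))
    · rw [List.filter_cons_of_neg hp, List.filter_cons_of_neg hp, ← ih]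
      simp only [PySem.Set.discard, List.filter_filter]
      apply List.filter_congr
      intro y _
      by_cases hy : y = x
      · subst hy; simp [hp]
      · simp [hy]

-- the A-side fold over the distinct words of xs IS B's peeling loop
lemma fold_eq_go : ∀ (n : Nat) (xs : List String), xs.length ≤ n → ∀ acc : PySem.Set String,
    (PySem.Set.ofList xs).foldl (fun result k =>
      if ((xs.count k : Int) > 1) then PySem.Set.add result (k ++ "s") else result) acc
    = pluralize_words_go xs acc := by
  intro n
  induction n with
  | zero =>
    intro xs hlen acc
    rw [List.length_eq_zero_iff.mp (Nat.le_zero.mp hlen)]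
    rw [pluralize_words_go]; rfl
  | succ n ih =>
    intro xs hlen acc
    match xs with
    | [] => rw [pluralize_words_go]; rfl
    | w :: rs =>
      rw [PySem.Set.ofList_cons, List.foldl_cons]
      have hcnt : (w :: rs).count w = rs.count w + 1 := List.count_cons_self ..
      have hcond : (((w :: rs).count w : Int) > 1) ↔ rs.contains w = true := by
        rw [hcnt]
        simp only [List.contains_eq_mem, decide_eq_true_eq, ← List.count_pos_iff]
        omega
      have hstep :
          (if (((w :: rs).count w : Int) > 1) then PySem.Set.add acc (w ++ "s") else acc)
          = (if rs.contains w then PySem.Set.add acc (w ++ "s") else acc) := by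
        by_cases h : rs.contains w = true
        · rw [if_pos (hcond.mpr h), if_pos h]
        · rw [if_neg (fun hh => h (hcond.mp hh)), if_neg h]
      rw [hstep]
      show List.foldl _ _ ((PySem.Set.ofList rs).discard w) = _
      have hdis : (PySem.Set.ofList rs).discard w
          = PySem.Set.ofList (rs.filter (fun x => x != w)) := ofList_filter _ rs
      rw [hdis]
      have hswap : ∀ (a : PySem.Set String) (k : String),
          k ∈ PySem.Set.ofList (rs.filter (fun x => x != w)) →
          (if (((w :: rs).count k : Int) > 1) then PySem.Set.add a (k ++ "s") else a)
          = (if (((rs.filter (fun x => x != w)).count k : Int) > 1)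
             then PySem.Set.add a (k ++ "s") else a) := by
        intro a k hk
        have hkmem : k ∈ rs.filter (fun x => x != w) := (PySem.Set.mem_ofList _ _).mp hk
        have hkne : (k != w) = true := (List.mem_filter.mp hkmem).2
        have h1 : (rs.filter (fun x => x != w)).count k = rs.count k :=
          List.count_filter hkne
        have h2 : (w :: rs).count k = rs.count k := by
          rw [List.count_cons_of_ne (by simpa using (Ne.symm (by simpa using hkne : k ≠ w)))]
        rw [h1, h2]
      rw [PySem.List.foldl_congr_mem _ _ _ _ hswap]
      rw [ih (rs.filter (fun x => x != w))
        (Nat.le_trans (List.length_filter_le _ rs) (Nat.le_of_succ_le_succ hlen))]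
      conv_rhs => rw [pluralize_words_go]

-- ===== VERDICT (by name: the statement is the Claim_ definition above) =====
theorem pluralize_words_spec : Claim_equal_pluralize_words := by
  intro list1 _
  show pluralize_words list1 = pluralize_words_alt list1
  simp only [pluralize_words, pluralize_words_alt]
  rw [dictA_eq_counter, PySem.Dict.items_counter, List.foldl_map]
  exact fold_eq_go list1.length list1 (Nat.le_refl _) PySem.Set.empty
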